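-- pv_equiv track=rewrite | github.com/jmuguerza/adventofcode | day9.py | get_total_score_and_garbage
-- ===== SOURCE A (Python) =====
-- def get_total_score_and_garbage(stream):
--     """ Return the total score for the stream of characters """
--     garbage = False
--     depth = 0
--     total_score = 0
--     total_garbage = 0
--     iterator = iter(stream)
--     for char in iterator:
--         if char == '!':
--             # Discard next character
--             next(iterator)
--             continue
--         elif garbage and char == '>':
--             garbage = False
--             continue
--         elif garbage and char != '>':
--             total_garbage += 1
--             continue
--         elif char == '<':
--             garbage = True
--             continue
--         elif char == '{':
--             depth += 1
--             continue
--         elif char == '}':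
--             total_score += depth
--             depth -= 1
--             continue
--     return total_score, total_garbage
-- ===== SOURCE B (Python) =====
-- def get_total_score_and_garbage(stream):
--     """ Return the total score for the stream of characters """
--     # Pass 1: remove '!'-escapes (each '!' discards the following character).
--     it = iter(stream)
--     cleaned = []
--     for ch in it:
--         if ch == '!':
--             next(it)
--         else:
--             cleaned.append(ch)
--     # Pass 2: score the cleaned stream; no '!' logic needed.
--     garbage = False
--     depth = 0
--     total_score = 0
--     total_garbage = 0
--     for ch in cleaned:
--         if garbage:
--             if ch == '>':
--                 garbage = False
--             else:
--                 total_garbage += 1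
--         elif ch == '<':
--             garbage = True
--         elif ch == '{':
--             depth += 1
--         elif ch == '}':
--             total_score += depth
--             depth -= 1
--     return total_score, total_garbage
-- ===== Notes on version B (the rewrite author's own statement) =====
-- stated objective: alternative
-- what changed: Split A's single stateful scan into two passes: a first pass that strips '!'-escapes into a cleaned list, then a second pass that computes score and garbage with no escape logic.
import Mathlib
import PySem

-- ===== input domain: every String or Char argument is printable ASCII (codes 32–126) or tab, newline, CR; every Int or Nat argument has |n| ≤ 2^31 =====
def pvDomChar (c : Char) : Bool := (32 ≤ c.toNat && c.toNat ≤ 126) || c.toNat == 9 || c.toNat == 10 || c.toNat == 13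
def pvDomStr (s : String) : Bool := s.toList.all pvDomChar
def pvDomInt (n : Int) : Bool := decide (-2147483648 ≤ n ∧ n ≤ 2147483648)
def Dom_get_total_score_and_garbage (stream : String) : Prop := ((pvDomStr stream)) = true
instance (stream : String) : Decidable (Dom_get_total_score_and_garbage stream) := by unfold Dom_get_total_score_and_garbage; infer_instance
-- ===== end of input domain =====

-- B changes the decomposition: one escape-stripping pass, then an escape-free scoring pass (alternative, not faster).

-- ===== PORT A =====
-- A's single loop over the iterator; '!' consumes the next character in place.
-- On a trailing active '!' Python A raises StopIteration (excluded by Pre_); that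
-- branch returns the current accumulators (unreachable under Pre_).
def goA : List Char → Bool → Int → Int → Int → Int × Int
  | [], _, _, ts, tg => (ts, tg)
  | c :: rest, g, d, ts, tg =>
    if c = '!' then
      match rest with
      | [] => (ts, tg)
      | _ :: r => goA r g d ts tg
    else if g = true ∧ c = '>' then goA rest false d ts tg
    else if g = true ∧ c ≠ '>' then goA rest g d ts (tg + 1)
    else if c = '<' then goA rest true d ts tg
    else if c = '{' then goA rest g (d + 1) ts tg
    else if c = '}' then goA rest g (d - 1) (ts + d) tg
    else goA rest g d ts tg

def get_total_score_and_garbage (stream : String) : Int × Int :=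
  goA stream.toList false 0 0 0

-- ===== PORT B =====
-- Pass 1: strip '!'-escapes (a trailing active '!' raises in Python B too; excluded by Pre_).
def stripBang : List Char → List Char
  | [] => []
  | c :: rest =>
    if c = '!' then
      match rest with
      | [] => []
      | _ :: r => stripBang r
    else c :: stripBang rest

-- Pass 2: score the cleaned stream, no escape logic.
def goB : List Char → Bool → Int → Int → Int → Int × Int
  | [], _, _, ts, tg => (ts, tg)
  | c :: rest, g, d, ts, tg =>
    if g then
      if c = '>' then goB rest false d ts tg
      else goB rest g d ts (tg + 1)
    else if c = '<' then goB rest true d ts tg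
    else if c = '{' then goB rest g (d + 1) ts tg
    else if c = '}' then goB rest g (d - 1) (ts + d) tg
    else goB rest g d ts tg

def get_total_score_and_garbage_alt (stream : String) : Int × Int :=
  goB (stripBang stream.toList) false 0 0 0

-- ===== PRECONDITION & SPEC =====
-- Pre_ excludes exactly the streams whose trailing run of '!' has odd length:
-- there Python A raises StopIteration from next(iterator) (and Python B raises the same way).
def Pre_get_total_score_and_garbage (stream : String) : Prop :=
  (stream.toList.reverse.takeWhile (· == '!')).length % 2 = 0
instance (stream : String) : Decidable (Pre_get_total_score_and_garbage stream) := by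
  unfold Pre_get_total_score_and_garbage; infer_instance

def pvWitness_get_total_score_and_garbage : String := "{{<a!>},{<!!b>}}"

def Spec_get_total_score_and_garbage (stream : String) (out : Int × Int) : Prop := out = get_total_score_and_garbage_alt stream
instance (stream : String) (out : Int × Int) : Decidable (Spec_get_total_score_and_garbage stream out) := by unfold Spec_get_total_score_and_garbage; infer_instance

-- ===== CLAIM (what is proved, stated in full; the proofs are below) =====
def Claim_equal_get_total_score_and_garbage : Prop := ∀ (stream : String), Dom_get_total_score_and_garbage stream → Pre_get_total_score_and_garbage stream → Spec_get_total_score_and_garbage stream (get_total_score_and_garbage stream)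

-- ===== LEMMAS AND PROOFS =====

-- The fused scan equals the strip-then-score composition on every list
-- (on the bad trailing-'!' case both sides return the accumulators, so no side condition is needed).
theorem goA_eq_goB_strip (l : List Char) :
    ∀ (g : Bool) (d ts tg : Int), goA l g d ts tg = goB (stripBang l) g d ts tg := by
  induction l using stripBang.induct with
  | case1 => intro g d ts tg; simp [goA, stripBang, goB]
  | case2 => intro g d ts tg; simp [goA, stripBang, goB]
  | case3 x r ih => intro g d ts tg; simpa [goA, stripBang] using ih g d ts tg
  | case4 c rest hc ih =>
      intro g d ts tg
      have hstrip : stripBang (c :: rest) = c :: stripBang rest := by cases rest <;> simp [stripBang, hc]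
      have hA : ∀ (g : Bool) (d ts tg : Int), goA (c :: rest) g d ts tg =
          (if g = true ∧ c = '>' then goA rest false d ts tg
           else if g = true ∧ c ≠ '>' then goA rest g d ts (tg + 1)
           else if c = '<' then goA rest true d ts tg
           else if c = '{' then goA rest g (d + 1) ts tg
           else if c = '}' then goA rest g (d - 1) (ts + d) tg
           else goA rest g d ts tg) := by
        intro g d ts tg
        cases rest <;> simp [goA, hc]
      rw [hA, hstrip]
      cases g with
      | true =>
          by_cases hgt : c = '>'
          · subst hgt; simp [goB, ih]
          · simp [goB, hgt, ih]
      | false =>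
          by_cases hlt : c = '<'
          · subst hlt; simp [goB, ih]
          · by_cases hbr : c = '{'
            · subst hbr; simp [goB, hlt, ih]
            · by_cases hbc : c = '}'
              · subst hbc; simp [goB, hlt, hbr, ih]
              · simp [goB, hlt, hbr, hbc, ih]

-- ===== VERDICT (by name: the statement is the Claim_ definition above) =====
theorem get_total_score_and_garbage_spec : Claim_equal_get_total_score_and_garbage := by
  intro stream _ _
  unfold Spec_get_total_score_and_garbage get_total_score_and_garbage get_total_score_and_garbage_alt
  exact goA_eq_goB_strip _ _ _ _ _
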